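-- pv_equiv track=rewrite | github.com/clever-scientist/TrainingSpeech | audiocorp/utils.py | get_roman_numbers
-- ===== SOURCE A (Python) =====
-- ROMAN_CHARS = 'XVI'
--
-- def get_roman_numbers(ch):
--
--     ro = ''
--     ros = 0
--     for i in range(len(ch)):
--         c = ch[i]
--         if c in ROMAN_CHARS:
--             if len(ro) == 0 and not ch[i-1].isalpha():
--                 ro = c
--                 ros = i
--             else:
--                 if len(ro) > 0 and ch[i-1] in ROMAN_CHARS:
--                     ro += c
--         else:
--             if len(ro) > 0:
--                 if not c.isalpha():
--                     yield ch[ros-1], ch[i], ro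
--                 ro = ''
--                 ros = i
--
--     if len(ro) > 0:
--         yield ch[ros-1], '', ro
-- ===== SOURCE B (Python) =====
-- ROMAN_CHARS = 'XVI'
--
-- def get_roman_numbers(ch):
--     # Index-jump scan over maximal runs of roman characters (instead of a
--     # per-character state machine).  ch[i-1] uses plain Python indexing so the
--     # negative-index wraparound at a run starting at position 0 is preserved.
--     n = len(ch)
--     i = 0
--     while i < n:
--         if ch[i] in ROMAN_CHARS:
--             j = i
--             while j < n and ch[j] in ROMAN_CHARS:
--                 j += 1
--             if not ch[i - 1].isalpha():
--                 if j == n: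
--                     yield ch[i - 1], '', ch[i:j]
--                 elif not ch[j].isalpha():
--                     yield ch[i - 1], ch[j], ch[i:j]
--             i = j
--         else:
--             i += 1
-- ===== Notes on version B (the rewrite author's own statement) =====
-- stated objective: alternative
-- what changed: Replaces the per-character state machine (accumulator string ro + start index ros with start/extend/reset transitions) by an index-jump scan that finds each maximal run of roman characters with an inner while loop and emits the tuple from the run's boundaries and a slice.
import Mathlib
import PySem

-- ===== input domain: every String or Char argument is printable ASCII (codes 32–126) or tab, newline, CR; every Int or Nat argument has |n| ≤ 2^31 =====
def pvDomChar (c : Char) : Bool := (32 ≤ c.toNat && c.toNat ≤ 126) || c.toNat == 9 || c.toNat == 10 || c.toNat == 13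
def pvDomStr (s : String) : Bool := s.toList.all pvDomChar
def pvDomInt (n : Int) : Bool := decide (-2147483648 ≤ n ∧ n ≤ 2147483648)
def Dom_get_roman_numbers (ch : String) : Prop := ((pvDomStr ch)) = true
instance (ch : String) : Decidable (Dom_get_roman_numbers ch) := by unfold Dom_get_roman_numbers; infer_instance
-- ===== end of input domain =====

-- B replaces A's per-character state machine by an index-jump scan over maximal
-- roman-character runs (alternative decomposition, same O(n) cost); A's generator
-- is ported as the list of yielded tuples.

-- ===== PORT A =====

-- ROMAN_CHARS = 'XVI'; `c in ROMAN_CHARS` for a single char c is exactly membership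
def pvRoman : List Char := ['X', 'V', 'I']

-- Python indexing ch[i] over the char list; every use below is in range (Python never
-- raises here), so the default ' ' of getD is never produced.
def pvGet (l : List Char) (i : Int) : Char := (PySem.List.pyGet? l i).getD ' '

-- A's `for i in range(len(ch))` loop, one recursive step per iteration (fuel = number of
-- iterations left, i the loop index; called with fuel = len(ch), i = 0), state (ro, ros)
-- exactly as in the Python
def pvALoop (l : List Char) : Nat → Nat → List Char → Nat → List (String × String × String)
  | 0, _, ro, ros =>
    if 0 < ro.length then
      [(String.ofList [pvGet l ((ros : Int) - 1)], "", String.ofList ro)]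
    else []
  | fuel + 1, i, ro, ros =>
    let c := pvGet l (i : Int)
    if c ∈ pvRoman then
      if ro.length = 0 ∧ ¬ PySem.Chars.isalpha (pvGet l ((i : Int) - 1)) = true then
        pvALoop l fuel (i + 1) [c] i
      else if 0 < ro.length ∧ pvGet l ((i : Int) - 1) ∈ pvRoman then
        pvALoop l fuel (i + 1) (ro ++ [c]) ros
      else
        pvALoop l fuel (i + 1) ro ros
    else
      if 0 < ro.length then
        (if ¬ PySem.Chars.isalpha c = true then
            [(String.ofList [pvGet l ((ros : Int) - 1)], String.ofList [c], String.ofList ro)]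
          else []) ++ pvALoop l fuel (i + 1) [] i
      else
        pvALoop l fuel (i + 1) ro ros

def get_roman_numbers (ch : String) : List (String × String × String) :=
  pvALoop ch.toList ch.toList.length 0 [] 0

-- ===== PORT B =====

-- inner `while j < n and ch[j] in ROMAN_CHARS: j += 1`; fuel bounds the number of
-- iterations (len(ch) always suffices, and the result is fuel-independent — see pvRunEnd_fuel)
def pvRunEnd (l : List Char) : Nat → Nat → Nat
  | 0, j => j
  | fuel + 1, j =>
    if j < l.length ∧ pvGet l (j : Int) ∈ pvRoman then pvRunEnd l fuel (j + 1) else j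

-- the emission for the run [i, j) (B's `if not ch[i-1].isalpha()` block;
-- ch[i:j] with 0 ≤ i ≤ j ≤ len is exactly (drop i).take (j - i))
def pvEmit (l : List Char) (i j : Nat) : List (String × String × String) :=
  if ¬ PySem.Chars.isalpha (pvGet l ((i : Int) - 1)) = true then
    if j = l.length then
      [(String.ofList [pvGet l ((i : Int) - 1)], "", String.ofList ((l.drop i).take (j - i)))]
    else if ¬ PySem.Chars.isalpha (pvGet l (j : Int)) = true then
      [(String.ofList [pvGet l ((i : Int) - 1)], String.ofList [pvGet l (j : Int)],
        String.ofList ((l.drop i).take (j - i)))]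
    else []
  else []

-- outer `while i < n` of B: skip a non-roman char, or handle a whole run and jump to its
-- end; fuel bounds the number of iterations (i strictly increases, so len(ch) suffices,
-- and the result is fuel-independent — see pvBLoop_fuel)
def pvBLoop (l : List Char) : Nat → Nat → List (String × String × String)
  | 0, _ => []
  | fuel + 1, i =>
    if i < l.length then
      if pvGet l (i : Int) ∈ pvRoman then
        pvEmit l i (pvRunEnd l l.length i) ++ pvBLoop l fuel (pvRunEnd l l.length i)
      else
        pvBLoop l fuel (i + 1)
    else []

def get_roman_numbers_alt (ch : String) : List (String × String × String) :=
  pvBLoop ch.toList ch.toList.length 0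

-- ===== PRECONDITION & SPEC =====
def Spec_get_roman_numbers (ch : String) (out : List (String × String × String)) : Prop := out = get_roman_numbers_alt ch
instance (ch : String) (out : List (String × String × String)) : Decidable (Spec_get_roman_numbers ch out) := by unfold Spec_get_roman_numbers; infer_instance

-- ===== CLAIM (what is proved, stated in full; the proofs are below) =====
def Claim_equal_get_roman_numbers : Prop := ∀ (ch : String), Dom_get_roman_numbers ch → Spec_get_roman_numbers ch (get_roman_numbers ch)

-- ===== LEMMAS AND PROOFS =====

theorem pvGet_nat (l : List Char) (i : Nat) :
    pvGet l (i : Int) = l.getD i ' ' := by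
  simp [pvGet, List.getD]

theorem pvGet_sub_one (l : List Char) (i : Nat) (h : 1 ≤ i) :
    pvGet l ((i : Int) - 1) = l.getD (i - 1) ' ' := by
  have h0 : (0 : Int) ≤ (i : Int) - 1 := by omega
  rw [pvGet, PySem.List.pyGet?_of_nonneg (h := h0)]
  have he : ((i : Int) - 1).toNat = i - 1 := by omega
  rw [he]; simp [List.getD]

theorem pvRoman_alpha (c : Char) (h : c ∈ pvRoman) :
    PySem.Chars.isalpha c = true := by
  simp [pvRoman] at h
  rcases h with h | h | h <;> subst h <;> decide

theorem pvTake_nonempty (l : List Char) (ros i : Nat) (h1 : ros < i) (h2 : i ≤ l.length) :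
    0 < ((l.drop ros).take (i - ros)).length := by
  simp [List.length_take, List.length_drop]; omega

theorem pvTake_snoc (l : List Char) (ros i : Nat) (h1 : ros ≤ i) (h2 : i < l.length) :
    (l.drop ros).take (i + 1 - ros) = (l.drop ros).take (i - ros) ++ [l.getD i ' '] := by
  have he : i + 1 - ros = (i - ros) + 1 := by omega
  rw [he, List.take_add_one]
  congr 1
  have hlt : i - ros < (l.drop ros).length := by simp [List.length_drop]; omega
  rw [List.getElem?_eq_getElem hlt]
  simp [List.getElem_drop, Nat.add_sub_cancel' h1, List.getD,
    List.getElem?_eq_getElem (by omega : i < l.length)]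

theorem pvRunEnd_ge (l : List Char) (f j : Nat) : j ≤ pvRunEnd l f j := by
  induction f generalizing j with
  | zero => exact le_refl j
  | succ f ih =>
    rw [pvRunEnd]
    split
    · have := ih (j + 1); omega
    · exact le_refl j

theorem pvRunEnd_fuel (l : List Char) (f1 : Nat) :
    ∀ f2 j, l.length - j ≤ f1 → l.length - j ≤ f2 →
      pvRunEnd l f1 j = pvRunEnd l f2 j := by
  induction f1 with
  | zero =>
    intro f2 j h1 h2
    cases f2 with
    | zero => rfl
    | succ f2 => rw [pvRunEnd, pvRunEnd, if_neg (by omega)]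
  | succ f1 ih =>
    intro f2 j h1 h2
    cases f2 with
    | zero => rw [pvRunEnd, pvRunEnd, if_neg (by omega)]
    | succ f2 =>
      rw [pvRunEnd]
      conv_rhs => rw [pvRunEnd]
      by_cases hc : j < l.length ∧ pvGet l (j : Int) ∈ pvRoman
      · rw [if_pos hc, if_pos hc]
        exact ih f2 (j + 1) (by omega) (by omega)
      · rw [if_neg hc, if_neg hc]

theorem pvRunEnd_succ (l : List Char) (i : Nat) (h : i < l.length)
    (hr : pvGet l (i : Int) ∈ pvRoman) :
    pvRunEnd l l.length i = pvRunEnd l l.length (i + 1) := by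
  rw [pvRunEnd_fuel l l.length (l.length - i) i (by omega) (by omega)]
  have h1 : l.length - i = (l.length - i - 1) + 1 := by omega
  rw [h1, pvRunEnd, if_pos ⟨h, hr⟩]
  exact pvRunEnd_fuel l (l.length - i - 1) l.length (i + 1) (by omega) (by omega)

theorem pvRunEnd_stop (l : List Char) (j : Nat)
    (hr : ¬ (j < l.length ∧ pvGet l (j : Int) ∈ pvRoman)) :
    pvRunEnd l l.length j = j := by
  cases hE : l.length with
  | zero => rfl
  | succ m => rw [← hE]; rw [hE, pvRunEnd, if_neg (by exact hr)]

theorem pvRunEnd_gt (l : List Char) (i : Nat) (h : i < l.length)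
    (hr : pvGet l (i : Int) ∈ pvRoman) : i < pvRunEnd l l.length i := by
  rw [pvRunEnd_succ l i h hr]
  have := pvRunEnd_ge l l.length (i + 1); omega

theorem pvBLoop_fuel (l : List Char) (f1 : Nat) :
    ∀ f2 i, l.length - i ≤ f1 → l.length - i ≤ f2 →
      pvBLoop l f1 i = pvBLoop l f2 i := by
  induction f1 with
  | zero =>
    intro f2 i h1 h2
    cases f2 with
    | zero => rfl
    | succ f2 => rw [pvBLoop, pvBLoop, if_neg (by omega)]
  | succ f1 ih =>
    intro f2 i h1 h2
    cases f2 with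
    | zero => rw [pvBLoop, pvBLoop, if_neg (by omega)]
    | succ f2 =>
      rw [pvBLoop]
      conv_rhs => rw [pvBLoop]
      by_cases h : i < l.length
      · rw [if_pos h, if_pos h]
        by_cases hr : pvGet l (i : Int) ∈ pvRoman
        · rw [if_pos hr, if_pos hr]
          have hj := pvRunEnd_gt l i h hr
          rw [ih f2 (pvRunEnd l l.length i) (by omega) (by omega)]
        · rw [if_neg hr, if_neg hr]
          exact ih f2 (i + 1) (by omega) (by omega)
      · rw [if_neg h, if_neg h]

-- one unfolding step of B's loop at the canonical fuel, three shapes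
theorem pvBLoop_step_roman (l : List Char) (i : Nat) (h : i < l.length)
    (hr : pvGet l (i : Int) ∈ pvRoman) :
    pvBLoop l l.length i =
      pvEmit l i (pvRunEnd l l.length i) ++ pvBLoop l l.length (pvRunEnd l l.length i) := by
  rw [pvBLoop_fuel l l.length (l.length - i) i (by omega) (by omega)]
  have h1 : l.length - i = (l.length - i - 1) + 1 := by omega
  rw [h1, pvBLoop, if_pos h, if_pos hr]
  have hj := pvRunEnd_gt l i h hr
  rw [pvBLoop_fuel l (l.length - i - 1) l.length (pvRunEnd l l.length i) (by omega) (by omega)]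

theorem pvBLoop_step_skip (l : List Char) (i : Nat) (h : i < l.length)
    (hr : ¬ pvGet l (i : Int) ∈ pvRoman) :
    pvBLoop l l.length i = pvBLoop l l.length (i + 1) := by
  rw [pvBLoop_fuel l l.length (l.length - i) i (by omega) (by omega)]
  have h1 : l.length - i = (l.length - i - 1) + 1 := by omega
  rw [h1, pvBLoop, if_pos h, if_neg hr]
  exact pvBLoop_fuel l (l.length - i - 1) l.length (i + 1) (by omega) (by omega)

theorem pvBLoop_end (l : List Char) (i : Nat) (h : ¬ i < l.length) :
    pvBLoop l l.length i = [] := by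
  cases hE : l.length with
  | zero => rfl
  | succ m => rw [← hE]; rw [hE, pvBLoop, if_neg (by exact h)]

-- B emits nothing at a run whose left neighbour is roman (hence alphabetic) and skips it
theorem pvBLoop_skip (l : List Char) (i : Nat) (h1 : 1 ≤ i)
    (hr : l.getD (i - 1) ' ' ∈ pvRoman) :
    pvBLoop l l.length i = pvBLoop l l.length (pvRunEnd l l.length i) := by
  by_cases h : i < l.length
  · by_cases hc : pvGet l (i : Int) ∈ pvRoman
    · rw [pvBLoop_step_roman l i h hc]
      have hal : PySem.Chars.isalpha (pvGet l ((i : Int) - 1)) = true := by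
        rw [pvGet_sub_one l i h1]; exact pvRoman_alpha _ hr
      have hem : pvEmit l i (pvRunEnd l l.length i) = [] := by
        rw [pvEmit, if_neg (by simp [hal])]
      rw [hem, List.nil_append]
    · rw [pvRunEnd_stop l i (fun hx => hc hx.2)]
  · rw [pvRunEnd_stop l i (fun hx => h hx.1)]

-- the main simulation: (L1) with empty accumulator A's loop from i equals B's loop from i;
-- (L2) inside a started run [ros, i) A's loop equals B's emission at the run's end plus
-- B's continuation there
theorem pvMain (l : List Char) (fuel : Nat) :
    ∀ i, fuel + i = l.length →
    (∀ ros, pvALoop l fuel i [] ros = pvBLoop l l.length i) ∧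
    (∀ ros, ros < i →
      ¬ PySem.Chars.isalpha (pvGet l ((ros : Int) - 1)) = true →
      (∀ t, ros ≤ t → t < i → l.getD t ' ' ∈ pvRoman) →
      pvALoop l fuel i ((l.drop ros).take (i - ros)) ros =
        pvEmit l ros (pvRunEnd l l.length i) ++ pvBLoop l l.length (pvRunEnd l l.length i)) := by
  induction fuel with
  | zero =>
    intro i hfi
    have hi : i = l.length := by omega
    subst hi
    constructor
    · intro ros
      rw [pvALoop, pvBLoop_end l l.length (lt_irrefl l.length), if_neg (by simp)]
    · intro ros hlt hstart hrun
      rw [pvALoop,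
        if_pos (pvTake_nonempty l ros l.length hlt (le_refl _)),
        pvRunEnd_stop l l.length (fun hx => absurd hx.1 (lt_irrefl l.length)),
        pvEmit, if_pos hstart, if_pos rfl,
        pvBLoop_end l l.length (lt_irrefl l.length), List.append_nil]
  | succ fuel ih =>
    intro i hfi
    have h : i < l.length := by omega
    have ih' := ih (i + 1) (by omega)
    constructor
    · -- L1
      intro ros
      rw [pvALoop]
      by_cases hc : pvGet l (i : Int) ∈ pvRoman
      · rw [if_pos hc]
        by_cases hal : PySem.Chars.isalpha (pvGet l ((i : Int) - 1)) = true
        · -- run start blocked: A keeps ro empty; B emits nothing and jumps past the run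
          rw [if_neg (by simp [hal]), if_neg (by simp)]
          rw [ih'.1 ros, pvBLoop_step_roman l i h hc]
          have hem : pvEmit l i (pvRunEnd l l.length i) = [] := by
            rw [pvEmit, if_neg (by simp [hal])]
          rw [hem, List.nil_append, pvRunEnd_succ l i h hc]
          exact pvBLoop_skip l (i + 1) (by omega)
            (by simpa [Nat.add_sub_cancel, pvGet_nat l i] using hc)
        · -- run starts at i
          rw [if_pos ⟨rfl, hal⟩]
          have hro : [pvGet l (i : Int)] = (l.drop i).take (i + 1 - i) := by
            have h1 : i + 1 - i = 1 := by omega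
            have h0 : i - i = 0 := by omega
            have hs := pvTake_snoc l i i (le_refl i) h
            rw [h1] at hs ⊢
            rw [hs, h0, List.take_zero, List.nil_append, pvGet_nat l i]
          rw [hro]
          rw [ih'.2 i (by omega) hal
            (by intro t ht1 ht2
                have : t = i := by omega
                subst this
                rw [← pvGet_nat l t]; exact hc)]
          rw [pvBLoop_step_roman l i h hc, pvRunEnd_succ l i h hc]
      · -- non-roman char, accumulator empty: both just advance
        rw [if_neg hc, if_neg (by simp)]
        rw [ih'.1 ros, pvBLoop_step_skip l i h hc]
    · -- L2
      intro ros hlt hstart hrun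
      have hne := pvTake_nonempty l ros i hlt (le_of_lt h)
      rw [pvALoop]
      by_cases hc : pvGet l (i : Int) ∈ pvRoman
      · -- extend the run
        have hprev : pvGet l ((i : Int) - 1) ∈ pvRoman := by
          rw [pvGet_sub_one l i (by omega)]
          exact hrun (i - 1) (by omega) (by omega)
        rw [if_pos hc, if_neg (by rintro ⟨h0, -⟩; omega), if_pos ⟨hne, hprev⟩]
        have hsn : ((l.drop ros).take (i - ros)) ++ [pvGet l (i : Int)] =
            (l.drop ros).take (i + 1 - ros) := by
          rw [pvTake_snoc l ros i (by omega) h, pvGet_nat l i]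
        rw [hsn]
        rw [ih'.2 ros (by omega) hstart
          (by intro t ht1 ht2
              by_cases htc : t < i
              · exact hrun t ht1 htc
              · have : t = i := by omega
                subst this
                rw [← pvGet_nat l t]; exact hc)]
        rw [pvRunEnd_succ l i h hc]
      · -- run ends at i: A emits (maybe) and resets; B's run end is i itself
        rw [if_neg hc, if_pos hne]
        rw [pvRunEnd_stop l i (fun hx => hc hx.2)]
        have hemit : pvEmit l ros i =
            (if ¬ PySem.Chars.isalpha (pvGet l (i : Int)) = true then
              [(String.ofList [pvGet l ((ros : Int) - 1)], String.ofList [pvGet l (i : Int)],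
                String.ofList ((l.drop ros).take (i - ros)))] else []) := by
          rw [pvEmit, if_pos hstart, if_neg (by omega : ¬ i = l.length)]
        rw [hemit, ih'.1 i, pvBLoop_step_skip l i h hc]

-- ===== VERDICT (by name: the statement is the Claim_ definition above) =====
theorem get_roman_numbers_spec : Claim_equal_get_roman_numbers := by
  intro ch _
  unfold Spec_get_roman_numbers get_roman_numbers get_roman_numbers_alt
  exact ((pvMain ch.toList ch.toList.length 0 (by omega)).1 0)
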